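-- pv_equiv track=rewrite | github.com/lavender-snow/my-codewars | 7kyu_Numbers_with_this_digit_inside.py | numbers_with_digit_inside
-- ===== SOURCE A (Python) =====
-- def numbers_with_digit_inside(x, d):
--     l = [0,0,1]
--     for i in range(1,x+1):
--         if str(d) in str(i):
--             l[0] += 1
--             l[1] += i
--             l[2] *= i
--     if l[0] == 0:
--         return [0,0,0]
--     else:
--         return l
-- ===== SOURCE B (Python) =====
-- def numbers_with_digit_inside(x, d):
--     s = str(d)
--
--     def go(lo, hi):
--         # (count, sum, product) over the matching numbers in [lo, hi]
--         if lo > hi: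
--             return (0, 0, 1)
--         if lo == hi:
--             return (1, lo, lo) if s in str(lo) else (0, 0, 1)
--         mid = (lo + hi) // 2
--         c1, s1, p1 = go(lo, mid)
--         c2, s2, p2 = go(mid + 1, hi)
--         return (c1 + c2, s1 + s2, p1 * p2)
--
--     c, t, p = go(1, x)
--     return [c, t, p] if c else [0, 0, 0]
-- ===== Notes on version B (the rewrite author's own statement) =====
-- stated objective: alternative
-- what changed: B replaces A's linear left-to-right accumulating loop by a divide-and-conquer recursion that splits [1,x] at the midpoint and merges (count,sum,product) triples, building the product as a balanced tree of multiplications instead of one growing left fold.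
import Mathlib
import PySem

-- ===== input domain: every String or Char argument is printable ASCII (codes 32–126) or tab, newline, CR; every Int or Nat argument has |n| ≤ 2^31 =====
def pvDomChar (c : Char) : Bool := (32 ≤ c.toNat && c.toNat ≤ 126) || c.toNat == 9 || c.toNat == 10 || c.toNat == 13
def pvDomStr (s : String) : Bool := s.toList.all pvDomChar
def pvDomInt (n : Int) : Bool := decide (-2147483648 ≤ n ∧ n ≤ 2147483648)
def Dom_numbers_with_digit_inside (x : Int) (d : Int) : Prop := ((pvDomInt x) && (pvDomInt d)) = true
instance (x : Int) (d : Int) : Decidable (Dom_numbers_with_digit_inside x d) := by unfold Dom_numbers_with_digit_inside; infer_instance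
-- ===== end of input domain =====

-- B replaces A's single accumulating loop over 1..x by a divide-and-conquer
-- recursion merging (count,sum,product) triples (objective: alternative).

-- ===== PORT A =====
-- A's list l = [count, sum, prod] is carried as a triple of the same three values.
def numbers_with_digit_inside (x : Int) (d : Int) : List Int :=
  let l := (PySem.List.pyRange 1 (x + 1) 1).foldl
    (fun (l : Int × Int × Int) i =>
      if PySem.Str.isIn (PySem.Int.toStr d) (PySem.Int.toStr i) then
        (l.1 + 1, l.2.1 + i, l.2.2 * i)
      else l)
    (0, 0, 1)
  if l.1 = 0 then [0, 0, 0] else [l.1, l.2.1, l.2.2]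

-- ===== PORT B =====
-- Source B's inner 'go': (count, sum, product) over the matching numbers in [lo, hi].
def pvGo (s : String) (lo hi : Int) : Int × Int × Int :=
  if lo > hi then (0, 0, 1)
  else if lo = hi then
    (if PySem.Str.isIn s (PySem.Int.toStr lo) then (1, lo, lo) else (0, 0, 1))
  else
    let mid := PySem.Int.floordiv (lo + hi) 2
    let l := pvGo s lo mid
    let r := pvGo s (mid + 1) hi
    (l.1 + r.1, l.2.1 + r.2.1, l.2.2 * r.2.2)
termination_by (hi - lo).toNat
decreasing_by
  all_goals
    have h := PySem.Int.floordiv_two_mid_bounds (lo := lo) (hi := hi) (by omega)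
    have h2 : PySem.Int.floordiv (lo + hi) 2 < hi := by
      rw [PySem.Int.floordiv_lt_iff_lt_mul (by omega)]; omega
    omega

def numbers_with_digit_inside_alt (x : Int) (d : Int) : List Int :=
  let s := PySem.Int.toStr d
  let r := pvGo s 1 x
  if r.1 ≠ 0 then [r.1, r.2.1, r.2.2] else [0, 0, 0]

-- ===== PRECONDITION & SPEC =====
def Spec_numbers_with_digit_inside (x : Int) (d : Int) (out : List Int) : Prop := out = numbers_with_digit_inside_alt x d
instance (x : Int) (d : Int) (out : List Int) : Decidable (Spec_numbers_with_digit_inside x d out) := by unfold Spec_numbers_with_digit_inside; infer_instance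

-- ===== CLAIM (what is proved, stated in full; the proofs are below) =====
def Claim_equal_numbers_with_digit_inside : Prop := ∀ (x : Int) (d : Int), Dom_numbers_with_digit_inside x d → Spec_numbers_with_digit_inside x d (numbers_with_digit_inside x d)

-- ===== LEMMAS AND PROOFS =====

-- A's fold over any list equals (init + len, init + sum, init * prod) of the filtered list.
theorem pv_fold_eq (p : Int → Bool) (L : List Int) (c s q : Int) :
    L.foldl (fun (l : Int × Int × Int) i => if p i then (l.1 + 1, l.2.1 + i, l.2.2 * i) else l) (c, s, q)
      = (c + ((L.filter p).length : Int), s + (L.filter p).sum, q * (L.filter p).prod) := by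
  induction L generalizing c s q with
  | nil => simp
  | cons a t ih =>
    by_cases h : p a = true
    · simp [h, ih]
      refine ⟨by ring, by ring, by ring⟩
    · simp [List.foldl_cons, h, ih]

-- B's divide-and-conquer computes the same (len, sum, prod) triple of the filtered range.
theorem pv_go_eq (s : String) (lo hi : Int) :
    pvGo s lo hi
      = ((((PySem.List.pyRange lo (hi + 1) 1).filter (fun i => PySem.Str.isIn s (PySem.Int.toStr i))).length : Int),
         ((PySem.List.pyRange lo (hi + 1) 1).filter (fun i => PySem.Str.isIn s (PySem.Int.toStr i))).sum,
         ((PySem.List.pyRange lo (hi + 1) 1).filter (fun i => PySem.Str.isIn s (PySem.Int.toStr i))).prod) := by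
  fun_induction pvGo s lo hi with
  | case1 lo hi h =>
    rw [PySem.List.pyRange_one_eq_nil (by omega)]; simp
  | case2 hi h hm =>
    rw [PySem.List.pyRange_one_cons (by omega), PySem.List.pyRange_one_eq_nil (by omega)]
    simp at hm
    simp [hm]
  | case3 hi h hm =>
    rw [PySem.List.pyRange_one_cons (by omega), PySem.List.pyRange_one_eq_nil (by omega)]
    simp at hm
    simp [hm]
  | case4 lo hi h1 h2 mid l r ihl ihr =>
    have hb := PySem.Int.floordiv_two_mid_bounds (lo := lo) (hi := hi) (by omega)
    simp only [mid, l, r, ihl, ihr]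
    rw [PySem.List.pyRange_one_append lo (PySem.Int.floordiv (lo + hi) 2 + 1) (hi + 1)
        (by omega) (by omega)]
    simp only [List.filter_append, List.length_append, List.sum_append, List.prod_append,
      Prod.mk.injEq]
    trivial

-- ===== VERDICT (by name: the statement is the Claim_ definition above) =====
theorem numbers_with_digit_inside_spec : Claim_equal_numbers_with_digit_inside := by
  intro x d _
  unfold Spec_numbers_with_digit_inside numbers_with_digit_inside numbers_with_digit_inside_alt
  simp only [pv_fold_eq, pv_go_eq, zero_add, one_mul]
  rcases h : (PySem.List.pyRange 1 (x + 1) 1).filter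
      (fun i => PySem.Str.isIn (PySem.Int.toStr d) (PySem.Int.toStr i)) with _ | ⟨a, t⟩
  · simp
  · simp
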